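-- pv_equiv track=rewrite | github.com/nachodall/UBA-FCEN-TDA-AyED3 | Prácticas/Práctica 2/ej1.py | es_mas_a_la_izquierda
-- ===== SOURCE A (Python) =====
-- def es_mas_a_la_izquierda(A):
--     n = len(A)
--
--     # Caso base: si el arreglo tiene un solo elemento, es "más a la izquierda"
--     if n == 1:
--         return True
--
--     # Calculamos la suma de la mitad izquierda y la mitad derecha del arreglo
--     mitad = n // 2
--     suma_izquierda = sum(A[:mitad])
--     suma_derecha = sum(A[mitad:])
--
--     # Verificamos si la suma de la mitad izquierda es mayor que la de la mitad derecha
--     if suma_izquierda > suma_derecha: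
--         # Si es así, verificamos recursivamente si cada mitad es "más a la izquierda"
--         return es_mas_a_la_izquierda(A[:mitad]) and es_mas_a_la_izquierda(A[mitad:])
--     else:
--         return False
-- ===== SOURCE B (Python) =====
-- def es_mas_a_la_izquierda(A):
--     n = len(A)
--     if n == 0:
--         return False
--     # prefix sums: P[k] = sum of A[:k]
--     P = [0]
--     s = 0
--     for x in A:
--         s += x
--         P.append(s)
--     def check(i, j):
--         if j - i <= 1:
--             return True
--         mid = (i + j) // 2
--         if P[mid] - P[i] > P[j] - P[mid]:
--             return check(i, mid) and check(mid, j)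
--         return False
--     return check(0, n)
-- ===== Notes on version B (the rewrite author's own statement) =====
-- stated objective: alternative
-- what changed: B computes one prefix-sum array once and recurses on index pairs, getting each half-sum in O(1) with no list slicing, instead of A's re-slicing and re-summing at every recursion level.
import Mathlib
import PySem

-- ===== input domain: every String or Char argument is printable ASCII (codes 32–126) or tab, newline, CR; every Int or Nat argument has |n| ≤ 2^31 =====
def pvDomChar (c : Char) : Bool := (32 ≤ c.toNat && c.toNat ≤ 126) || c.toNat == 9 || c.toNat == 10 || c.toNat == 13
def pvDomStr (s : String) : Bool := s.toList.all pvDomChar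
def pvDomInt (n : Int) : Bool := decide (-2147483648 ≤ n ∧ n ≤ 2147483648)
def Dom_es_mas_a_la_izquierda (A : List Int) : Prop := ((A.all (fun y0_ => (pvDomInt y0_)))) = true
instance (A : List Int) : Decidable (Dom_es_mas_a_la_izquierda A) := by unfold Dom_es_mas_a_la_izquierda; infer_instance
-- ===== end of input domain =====

-- B replaces A's slice-and-resum recursion by one prefix-sum pass plus index recursion over that array (no list slicing); objective: alternative.

-- ===== PORT A =====
-- termination facts for A's recursion (for [] the guard 0 > 0 is false, so only cited under the guard)
theorem pvTakeHalfLt (A : List Int) (h1 : ¬ A.length = 1)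
    (h2 : (A.drop (A.length / 2)).sum < (A.take (A.length / 2)).sum) :
    (A.take (A.length / 2)).length < A.length := by
  rcases A with _ | ⟨x, t⟩
  · simp at h2
  · simp only [List.length_take, List.length_cons]; omega

theorem pvDropHalfLt (A : List Int) (h1 : ¬ A.length = 1)
    (h2 : (A.drop (A.length / 2)).sum < (A.take (A.length / 2)).sum) :
    (A.drop (A.length / 2)).length < A.length := by
  rcases A with _ | ⟨x, t⟩
  · simp at h2
  · simp only [List.length_cons] at h1
    simp only [List.length_drop, List.length_cons]; omega

-- A[:mitad] / A[mitad:] with 0 ≤ mitad ≤ n are exactly take/drop; sum(…) is List.sum.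
def es_mas_a_la_izquierda (A : List Int) : Bool :=
  let n := A.length
  if n = 1 then true
  else
    let mitad := n / 2
    let suma_izquierda := (A.take mitad).sum
    let suma_derecha := (A.drop mitad).sum
    if suma_izquierda > suma_derecha then
      es_mas_a_la_izquierda (A.take mitad) && es_mas_a_la_izquierda (A.drop mitad)
    else false
termination_by A.length
decreasing_by
  · exact pvTakeHalfLt A ‹_› ‹_›
  · exact pvDropHalfLt A ‹_› ‹_›

-- ===== PORT B =====
-- check(i, j) of Source B; P[k] (indices always in range 0..n) ported as getD.
def pvCheck (P : List Int) (i j : Nat) : Bool :=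
  if j - i ≤ 1 then true
  else
    let mid := (i + j) / 2
    if P.getD mid 0 - P.getD i 0 > P.getD j 0 - P.getD mid 0 then
      pvCheck P i mid && pvCheck P mid j
    else false
termination_by j - i
decreasing_by all_goals omega

def es_mas_a_la_izquierda_alt (A : List Int) : Bool :=
  let n := A.length
  if n = 0 then false
  else
    -- the prefix-sum loop of Source B: state (P, s)
    let Ps := A.foldl (fun (ps : List Int × Int) x => (ps.1 ++ [ps.2 + x], ps.2 + x)) ([0], 0)
    pvCheck Ps.1 0 n

-- ===== PRECONDITION & SPEC =====
def Spec_es_mas_a_la_izquierda (A : List Int) (out : Bool) : Prop := out = es_mas_a_la_izquierda_alt A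
instance (A : List Int) (out : Bool) : Decidable (Spec_es_mas_a_la_izquierda A out) := by unfold Spec_es_mas_a_la_izquierda; infer_instance

-- ===== CLAIM (what is proved, stated in full; the proofs are below) =====
def Claim_equal_es_mas_a_la_izquierda : Prop := ∀ (A : List Int), Dom_es_mas_a_la_izquierda A → Spec_es_mas_a_la_izquierda A (es_mas_a_la_izquierda A)

-- ===== LEMMAS AND PROOFS =====

-- unfolding lemmas for A's port
theorem pvEs_single (l : List Int) (h : l.length = 1) : es_mas_a_la_izquierda l = true := by
  rw [es_mas_a_la_izquierda]; simp [h]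

theorem pvEs_unfold (l : List Int) (h : ¬ l.length = 1) :
    es_mas_a_la_izquierda l =
      (if (l.take (l.length / 2)).sum > (l.drop (l.length / 2)).sum then
        es_mas_a_la_izquierda (l.take (l.length / 2)) && es_mas_a_la_izquierda (l.drop (l.length / 2))
      else false) := by
  rw [es_mas_a_la_izquierda]; simp [h]

-- the fold that builds P, characterised: running sums appended to the accumulator
def pvPref (A : List Int) (s : Int) : List Int :=
  match A with
  | [] => []
  | x :: t => (s + x) :: pvPref t (s + x)

theorem pvFold_eq (A : List Int) : ∀ (P0 : List Int) (s : Int),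
    A.foldl (fun (ps : List Int × Int) x => (ps.1 ++ [ps.2 + x], ps.2 + x)) (P0, s)
      = (P0 ++ pvPref A s, s + A.sum) := by
  induction A with
  | nil => intro P0 s; simp [pvPref]
  | cons x t ih =>
      intro P0 s
      simp only [List.foldl_cons, ih, pvPref, List.append_assoc, List.singleton_append,
        List.sum_cons]
      rw [add_assoc]

theorem pvPref_getD (A : List Int) : ∀ (s : Int) (k : Nat), k < A.length →
    (pvPref A s).getD k 0 = s + (A.take (k + 1)).sum := by
  induction A with
  | nil => intro s k h; simp at h
  | cons x t ih =>
      intro s k h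
      cases k with
      | zero => simp [pvPref]
      | succ k =>
          simp only [pvPref, List.getD_cons_succ, List.take_succ_cons, List.sum_cons]
          rw [ih (s + x) k (by simpa using h)]
          ring

-- P's entries are prefix sums of A
theorem pvP_getD (A : List Int) (j : Nat) (hj : j ≤ A.length) :
    (0 :: pvPref A 0).getD j 0 = (A.take j).sum := by
  cases j with
  | zero => simp
  | succ j =>
      simp only [List.getD_cons_succ]
      rw [pvPref_getD A 0 j (by omega)]
      simp

-- range sum from prefix sums
theorem pvSeg_sum (A : List Int) (i j : Nat) (hij : i ≤ j) (hj : j ≤ A.length) :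
    (0 :: pvPref A 0).getD j 0 - (0 :: pvPref A 0).getD i 0 = ((A.drop i).take (j - i)).sum := by
  rw [pvP_getD A j hj, pvP_getD A i (by omega)]
  have h : A.take j = A.take i ++ (A.drop i).take (j - i) := by
    rw [← List.take_add]
    congr 1
    omega
  rw [h, List.sum_append]
  ring

-- unfolding lemma for pvCheck's recursive case (zeta-reduced)
theorem pvCheck_unfold (P : List Int) (i j : Nat) (h : ¬ j - i ≤ 1) :
    pvCheck P i j =
      (if P.getD ((i + j) / 2) 0 - P.getD i 0 > P.getD j 0 - P.getD ((i + j) / 2) 0 then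
        pvCheck P i ((i + j) / 2) && pvCheck P ((i + j) / 2) j
      else false) := by
  rw [pvCheck]; simp [h]

-- main invariant: pvCheck on [i, j) computes A's port on the segment, for i < j ≤ |A|
theorem pvCheck_eq (A : List Int) : ∀ (k i j : Nat), j - i ≤ k → i < j → j ≤ A.length →
    pvCheck (0 :: pvPref A 0) i j = es_mas_a_la_izquierda ((A.drop i).take (j - i)) := by
  intro k
  induction k with
  | zero => intro i j h hij _; omega
  | succ k ih =>
      intro i j hk hij hj
      have hlen : ((A.drop i).take (j - i)).length = j - i := by
        simp only [List.length_take, List.length_drop]; omega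
      by_cases hbase : j - i ≤ 1
      · rw [pvCheck, if_pos hbase, pvEs_single _ (by omega)]
      · have hhalf : ((A.drop i).take (j - i)).length / 2 = (i + j) / 2 - i := by
          rw [hlen]; omega
        rw [pvCheck_unfold _ _ _ hbase, pvEs_unfold _ (by omega), hhalf]
        generalize hmid : (i + j) / 2 = mid
        have hmi : i < mid := by omega
        have hmj : mid < j := by omega
        have hA : ((A.drop i).take (j - i)).take (mid - i) = (A.drop i).take (mid - i) := by
          rw [List.take_take]; congr 1; omega
        have e1 : i + (mid - i) = mid := by omega
        have e2 : j - i - (mid - i) = j - mid := by omega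
        have hB : ((A.drop i).take (j - i)).drop (mid - i) = (A.drop mid).take (j - mid) := by
          rw [List.drop_take, List.drop_drop, e1, e2]
        have hsumL : (0 :: pvPref A 0).getD mid 0 - (0 :: pvPref A 0).getD i 0
            = (((A.drop i).take (j - i)).take (mid - i)).sum := by
          rw [hA, pvSeg_sum A i mid (by omega) (by omega)]
        have hsumR : (0 :: pvPref A 0).getD j 0 - (0 :: pvPref A 0).getD mid 0
            = (((A.drop i).take (j - i)).drop (mid - i)).sum := by
          rw [hB, pvSeg_sum A mid j (by omega) hj]
        rw [← hsumL, ← hsumR, hA, hB,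
          ih i mid (by omega) hmi (by omega), ih mid j (by omega) hmj hj]

-- ===== VERDICT (by name: the statement is the Claim_ definition above) =====
theorem es_mas_a_la_izquierda_spec : Claim_equal_es_mas_a_la_izquierda := by
  intro A _
  unfold Spec_es_mas_a_la_izquierda es_mas_a_la_izquierda_alt
  by_cases h0 : A.length = 0
  · rcases List.length_eq_zero_iff.mp h0 with rfl
    rw [es_mas_a_la_izquierda]
    simp
  · simp only [h0, if_false, pvFold_eq A [0] 0, List.singleton_append]
    rw [pvCheck_eq A A.length 0 A.length (by omega) (by omega) (le_refl _)]
    simp
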